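-- pv_equiv track=rewrite | github.com/python/cpython | Lib/_pyrepl/readline.py | _should_auto_indent
-- ===== SOURCE A (Python) =====
-- def _should_auto_indent(buffer: list[str], pos: int) -> bool:
--     # check if last character before "pos" is a colon, ignoring
--     # whitespaces and comments.
--     last_char = None
--     while pos > 0:
--         pos -= 1
--         if last_char is None:
--             if buffer[pos] not in " \t\n#":  # ignore whitespaces and comments
--                 last_char = buffer[pos]
--         else:
--             # even if we found a non-whitespace character before
--             # original pos, we keep going back until newline is reached
--             # to make sure we ignore comments
--             if buffer[pos] == "\n":
--                 break
--             if buffer[pos] == "#":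
--                 last_char = None
--     return last_char == ":"
-- ===== SOURCE B (Python) =====
-- def _last_code_char(line):
--     # code part of the line: tokens up to the first "#", then trailing
--     # whitespace-like tokens stripped; returns its last token (or None)
--     code = []
--     for tok in line:
--         if tok == "#":
--             break
--         code.append(tok)
--     while code and code[-1] in " \t\n#":
--         code.pop()
--     return code[-1] if code else None
--
-- def _should_auto_indent(buffer, pos):
--     prefix = buffer[:pos] if pos > 0 else []
--     lines = [[]]
--     for tok in prefix:
--         if tok == "\n":
--             lines.append([])
--         else:
--             lines[-1].append(tok)
--     for line in reversed(lines):
--         c = _last_code_char(line)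
--         if c is not None:
--             return c == ":"
--     return False
-- ===== Notes on version B (the rewrite author's own statement) =====
-- stated objective: alternative
-- what changed: A scans the buffer backwards once with a last_char/None state machine that is reset by '#' and stopped by newline; B instead splits the prefix into lines, extracts each line's code part (tokens before the first '#', trailing whitespace-like tokens stripped) and returns whether the last code token of the last non-empty-code line is ':'.
-- crash fix: When pos > len(buffer) A raises IndexError; B clamps the slice buffer[:pos] and returns the answer for the whole buffer. — e.g. on _should_auto_indent(["x"], 2): A raises IndexError, B returns false
import Mathlib
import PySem

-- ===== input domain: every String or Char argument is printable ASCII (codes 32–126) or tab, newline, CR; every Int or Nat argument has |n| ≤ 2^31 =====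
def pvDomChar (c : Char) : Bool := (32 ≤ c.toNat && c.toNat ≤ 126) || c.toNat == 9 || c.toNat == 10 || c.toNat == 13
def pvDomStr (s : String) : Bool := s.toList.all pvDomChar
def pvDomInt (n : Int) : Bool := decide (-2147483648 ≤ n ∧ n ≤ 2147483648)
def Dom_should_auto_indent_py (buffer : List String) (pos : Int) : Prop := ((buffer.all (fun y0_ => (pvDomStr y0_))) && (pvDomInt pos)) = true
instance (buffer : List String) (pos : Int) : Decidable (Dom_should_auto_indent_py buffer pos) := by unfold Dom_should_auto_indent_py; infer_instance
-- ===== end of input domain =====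

-- B replaces A's backward last_char state machine by line splitting plus a per-line
-- "code part" extraction (tokens before the first '#', trailing whitespace stripped).

-- Python membership `t in " \t\n#"` (substring test), used by both versions
def pvIsWS (t : String) : Bool := PySem.Str.isIn t " \t\n#"

-- ===== PORT A =====
-- the while-loop of A, recursing on pos (pos > 0 turned into succ)
def saiGo (buffer : List String) : Nat → Option String → Option String
  | 0, last => last
  | p + 1, last =>
      let c := (PySem.List.pyGet? buffer (p : Int)).getD ""   -- in range under Pre_
      match last with
      | none => if pvIsWS c then saiGo buffer p none else saiGo buffer p (some c)
      | some l =>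
          if c == "\n" then some l
          else if c == "#" then saiGo buffer p none
          else saiGo buffer p (some l)

def should_auto_indent_py (buffer : List String) (pos : Int) : Bool :=
  saiGo buffer pos.toNat none == some ":"

-- ===== PORT B =====
-- `while code and code[-1] in " \t\n#": code.pop()` — pops trailing whitespace tokens
def pvDropWhileWS : List String → List String
  | [] => []
  | t :: r => if pvIsWS t then pvDropWhileWS r else t :: r

def pvRstrip (code : List String) : List String := (pvDropWhileWS code.reverse).reverse

def pvLastCodeChar (line : List String) : Option String :=
  -- line.takeWhile (· != "#") is the for/break loop of _last_code_char
  (pvRstrip (line.takeWhile (fun t => t != "#"))).getLast?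

def pvSegStep (st : List (List String) × List String) (tok : String) :
    List (List String) × List String :=
  if tok == "\n" then (st.1 ++ [st.2], []) else (st.1, st.2 ++ [tok])

def pvPick : List (List String) → Bool
  | [] => false
  | line :: rest =>
      match pvLastCodeChar line with
      | some c => c == ":"
      | none => pvPick rest

def should_auto_indent_py_alt (buffer : List String) (pos : Int) : Bool :=
  let pref := if pos > 0 then PySem.List.slice buffer none (some pos) else []
  let st := pref.foldl pvSegStep ([], [])
  pvPick (st.1 ++ [st.2]).reverse

-- ===== PRECONDITION & SPEC =====
-- Pre_ excludes exactly pos > len(buffer), where A's buffer[pos] raises IndexError.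
def Pre_should_auto_indent_py (buffer : List String) (pos : Int) : Prop :=
  pos ≤ (buffer.length : Int)
instance (buffer : List String) (pos : Int) : Decidable (Pre_should_auto_indent_py buffer pos) := by unfold Pre_should_auto_indent_py; infer_instance

def pvWitness_should_auto_indent_py : List String × Int := ([":", "a"], 1)

-- When pos > len(buffer) A raises IndexError; B clamps the slice buffer[:pos] and returns the answer for the whole buffer.
def Raises_should_auto_indent_py (buffer : List String) (pos : Int) : Prop :=
  (buffer.length : Int) < pos
instance (buffer : List String) (pos : Int) : Decidable (Raises_should_auto_indent_py buffer pos) := by unfold Raises_should_auto_indent_py; infer_instance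
def pvRaiseWitness_should_auto_indent_py : List String × Int := (["x"], 2)
def pvRaiseWitnessOut_should_auto_indent_py : Bool := false

def Spec_should_auto_indent_py (buffer : List String) (pos : Int) (out : Bool) : Prop := out = should_auto_indent_py_alt buffer pos
instance (buffer : List String) (pos : Int) (out : Bool) : Decidable (Spec_should_auto_indent_py buffer pos out) := by unfold Spec_should_auto_indent_py; infer_instance

-- ===== CLAIM (what is proved, stated in full; the proofs are below) =====
def Claim_equal_should_auto_indent_py : Prop := ∀ (buffer : List String) (pos : Int), Dom_should_auto_indent_py buffer pos → Pre_should_auto_indent_py buffer pos → Spec_should_auto_indent_py buffer pos (should_auto_indent_py buffer pos)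
def Claim_raises_should_auto_indent_py : Prop := (∀ (buffer : List String) (pos : Int), Dom_should_auto_indent_py buffer pos → Raises_should_auto_indent_py buffer pos → ¬ Pre_should_auto_indent_py buffer pos) ∧ (Dom_should_auto_indent_py (pvRaiseWitness_should_auto_indent_py.1) (pvRaiseWitness_should_auto_indent_py.2) ∧ Raises_should_auto_indent_py (pvRaiseWitness_should_auto_indent_py.1) (pvRaiseWitness_should_auto_indent_py.2) ∧ should_auto_indent_py_alt (pvRaiseWitness_should_auto_indent_py.1) (pvRaiseWitness_should_auto_indent_py.2) = pvRaiseWitnessOut_should_auto_indent_py)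

-- ===== LEMMAS AND PROOFS =====

-- A's loop, rephrased on the reversed prefix list
def listGo : List String → Option String → Option String
  | [], last => last
  | c :: t, none => if pvIsWS c then listGo t none else listGo t (some c)
  | c :: t, some l =>
      if c == "\n" then some l
      else if c == "#" then listGo t none
      else listGo t (some l)

-- A's loop restricted to a newline-free segment (no break, no newline skip)
def stateGo : List String → Option String → Option String
  | [], last => last
  | c :: t, none => if pvIsWS c then stateGo t none else stateGo t (some c)
  | c :: t, some l => if c == "#" then stateGo t none else stateGo t (some l)

-- the first pvLastCodeChar hit, as an Option
def pickOpt : List (List String) → Option String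
  | [] => none
  | line :: rest =>
      match pvLastCodeChar line with
      | some c => some c
      | none => pickOpt rest

-- join lines back with "\n" tokens
def unl : List (List String) → List String
  | [] => []
  | [l] => l
  | l :: l' :: ls => l ++ "\n" :: unl (l' :: ls)

theorem saiGo_eq (buffer : List String) (n : Nat) (last : Option String)
    (h : n ≤ buffer.length) : saiGo buffer n last = listGo (buffer.take n).reverse last := by
  induction n generalizing last with
  | zero => simp [saiGo, listGo]
  | succ p ih =>
      have hp : p < buffer.length := by omega
      have hget : (PySem.List.pyGet? buffer (p : Int)).getD "" = buffer[p] := by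
        simp [PySem.List.pyGet?_natCast, List.getElem?_eq_getElem hp]
      have htake : (buffer.take (p + 1)).reverse = buffer[p] :: (buffer.take p).reverse := by
        rw [List.take_add_one, List.getElem?_eq_getElem hp]
        simp
      rw [htake]
      match last with
      | none =>
          simp only [saiGo, listGo, hget]
          by_cases hws : pvIsWS buffer[p] = true
          · simp only [hws, if_true]; exact ih none (by omega)
          · simp only [hws, if_false, Bool.false_eq_true]
            exact ih (some buffer[p]) (by omega)
      | some l =>
          simp only [saiGo, listGo, hget]
          by_cases h1 : (buffer[p] == "\n") = true
          · simp [h1]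
          · by_cases h2 : (buffer[p] == "#") = true
            · simp only [h1, h2, if_true, if_false, Bool.false_eq_true]
              exact ih none (by omega)
            · simp only [h1, h2, if_false, Bool.false_eq_true]
              exact ih (some l) (by omega)

theorem lcc_nil : pvLastCodeChar [] = none := by rfl

theorem takeWhile_append_not {α : Type} (p : α → Bool) (t l : List α) (a : α)
    (ha : a ∈ t) (hpa : p a = false) : (t ++ l).takeWhile p = t.takeWhile p := by
  induction t with
  | nil => cases ha
  | cons x xs ih =>
      by_cases hx : p x = true
      · simp only [List.cons_append, List.takeWhile_cons, hx, if_true]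
        rcases List.mem_cons.1 ha with rfl | hmem
        · rw [hpa] at hx; cases hx
        · rw [ih hmem]
      · simp [Bool.eq_false_iff.2 hx]

theorem takeWhile_of_all {α : Type} (p : α → Bool) (t : List α)
    (h : ∀ a ∈ t, p a = true) : t.takeWhile p = t :=
  List.takeWhile_eq_self_iff.2 h

theorem takeWhile_snoc_fail {α : Type} (p : α → Bool) (t : List α) (d : α)
    (hall : ∀ a ∈ t, p a = true) (hd : p d = false) : (t ++ [d]).takeWhile p = t := by
  induction t with
  | nil => simp [hd]
  | cons x xs ih =>
      have hx := hall x (by simp)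
      simp only [List.cons_append, List.takeWhile_cons, hx, if_true]
      rw [ih (fun a ha => hall a (by simp [ha]))]

theorem rstrip_snoc (t : List String) (d : String) :
    pvRstrip (t ++ [d]) = if pvIsWS d then pvRstrip t else t ++ [d] := by
  by_cases hd : pvIsWS d = true <;> simp [pvRstrip, pvDropWhileWS, hd]

theorem lcc_hash_mem (t : List String) (d : String) (h : "#" ∈ t) :
    pvLastCodeChar (t ++ [d]) = pvLastCodeChar t := by
  unfold pvLastCodeChar
  rw [takeWhile_append_not _ t [d] "#" h (by simp)]

theorem lcc_ws (t : List String) (d : String) (hd : pvIsWS d = true) :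
    pvLastCodeChar (t ++ [d]) = pvLastCodeChar t := by
  by_cases h : "#" ∈ t
  · exact lcc_hash_mem t d h
  · have hall : ∀ a ∈ t, (fun s => s != "#") a = true := by
      intro a ha; simp; rintro rfl; exact h ha
    by_cases hdh : d = "#"
    · unfold pvLastCodeChar
      subst hdh
      rw [takeWhile_snoc_fail _ t _ hall (by simp), takeWhile_of_all _ t hall]
    · unfold pvLastCodeChar
      have heq : (t ++ [d]).takeWhile (fun s => s != "#") = t ++ [d] := by
        apply takeWhile_of_all
        intro a ha
        rcases List.mem_append.1 ha with h1 | h1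
        · exact hall a h1
        · simp at h1; subst h1; simp [hdh]
      rw [heq, takeWhile_of_all _ t hall, rstrip_snoc, hd]
      simp

theorem lcc_sig (t : List String) (d : String) (hmem : ¬ "#" ∈ t) (hd : pvIsWS d = false) :
    pvLastCodeChar (t ++ [d]) = some d := by
  have hall : ∀ a ∈ t, (fun s => s != "#") a = true := by
    intro a ha; simp; rintro rfl; exact hmem ha
  have hdh : d ≠ "#" := by
    rintro rfl
    rw [show pvIsWS "#" = true from by decide] at hd
    cases hd
  unfold pvLastCodeChar
  have heq : (t ++ [d]).takeWhile (fun s => s != "#") = t ++ [d] := by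
    apply takeWhile_of_all
    intro a ha
    rcases List.mem_append.1 ha with h1 | h1
    · exact hall a h1
    · simp at h1; subst h1; simp [hdh]
  rw [heq, rstrip_snoc, hd]
  simp

theorem stateGo_eq (t : List String) :
    stateGo t.reverse none = pvLastCodeChar t ∧
    ∀ c, stateGo t.reverse (some c) = if "#" ∈ t then pvLastCodeChar t else some c := by
  induction t using List.reverseRecOn with
  | nil => simp [stateGo, lcc_nil]
  | append_singleton t d ih =>
      rw [List.reverse_append, List.reverse_singleton, List.singleton_append]
      constructor
      · by_cases hd : pvIsWS d = true
        · simp only [stateGo, hd, if_true, ih.1]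
          exact (lcc_ws t d hd).symm
        · simp only [stateGo, hd, if_false, Bool.false_eq_true, ih.2 d]
          by_cases hm : "#" ∈ t
          · simp [hm, lcc_hash_mem t d hm]
          · simp [hm, lcc_sig t d hm (by simpa using hd)]
      · intro c
        by_cases hdh : (d == "#") = true
        · have hd : d = "#" := by simpa using hdh
          subst hd
          simp only [stateGo, ih.1]
          rw [if_pos hdh, if_pos (by simp : "#" ∈ t ++ ["#"]), lcc_ws t "#" (by decide)]
        · simp only [stateGo, hdh, if_false, Bool.false_eq_true, ih.2 c]
          have hne : d ≠ "#" := by simpa using hdh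
          have hmem : ("#" ∈ t ++ [d]) ↔ ("#" ∈ t) := by
            simp; rintro rfl; exact absurd rfl hne
          by_cases hm : "#" ∈ t
          · rw [if_pos hm, if_pos (hmem.2 hm), lcc_hash_mem t d hm]
          · rw [if_neg hm, if_neg (fun h => hm (hmem.1 h))]

theorem listGo_split (rs rest : List String) (h1 : "\n" ∉ rs)
    (h2 : rest = [] ∨ ∃ t', rest = "\n" :: t') :
    (listGo (rs ++ rest) none =
      (match stateGo rs none with
       | some c => some c
       | none => match rest with | [] => none | _ :: t' => listGo t' none)) ∧
    ∀ c, listGo (rs ++ rest) (some c) =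
      (match stateGo rs (some c) with
       | some c' => some c'
       | none => match rest with | [] => none | _ :: t' => listGo t' none) := by
  induction rs with
  | nil =>
      have hnl : pvIsWS "\n" = true := by decide
      constructor
      · rcases h2 with rfl | ⟨t', rfl⟩
        · simp [listGo, stateGo]
        · simp only [List.nil_append, stateGo, listGo, hnl, if_true]
      · intro c
        rcases h2 with rfl | ⟨t', rfl⟩
        · simp [listGo, stateGo]
        · simp [listGo, stateGo]
  | cons a rs' ih =>
      have ha : a ≠ "\n" := fun h => h1 (by simp [h])
      have han : (a == "\n") = false := by simpa using ha
      have ih' := ih (fun h => h1 (List.mem_cons_of_mem _ h))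
      constructor
      · by_cases hws : pvIsWS a = true
        · simp only [List.cons_append, listGo, stateGo, hws, if_true]
          exact ih'.1
        · simp only [List.cons_append, listGo, stateGo, hws, if_false, Bool.false_eq_true]
          exact ih'.2 a
      · intro c
        by_cases hha : (a == "#") = true
        · simp only [List.cons_append, listGo, stateGo, han, hha, if_false, if_true,
            Bool.false_eq_true]
          exact ih'.1
        · simp only [List.cons_append, listGo, stateGo, han, hha, if_false, Bool.false_eq_true]
          exact ih'.2 c

theorem unl_snoc (ls : List (List String)) (l' : List String) (h : ls ≠ []) :
    unl (ls ++ [l']) = unl ls ++ "\n" :: l' := by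
  induction ls with
  | nil => cases h rfl
  | cons a ls ih =>
      cases ls with
      | nil => simp [unl]
      | cons b ls' =>
          have hih := ih (by simp)
          simp only [List.cons_append] at hih ⊢
          simp [unl, hih]

theorem unl_snoc_snoc (ls : List (List String)) (l : List String) (x : String) :
    unl (ls ++ [l ++ [x]]) = unl (ls ++ [l]) ++ [x] := by
  cases ls with
  | nil => simp [unl]
  | cons a ls' =>
      rw [unl_snoc _ _ (by simp), unl_snoc _ _ (by simp)]
      simp

theorem seg_inv (pre : List String) :
    unl ((pre.foldl pvSegStep ([], [])).1 ++ [(pre.foldl pvSegStep ([], [])).2]) = pre ∧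
    ∀ l ∈ (pre.foldl pvSegStep ([], [])).1 ++ [(pre.foldl pvSegStep ([], [])).2], "\n" ∉ l := by
  induction pre using List.reverseRecOn with
  | nil => simp [unl]
  | append_singleton pre tok ih =>
      rw [List.foldl_append, List.foldl_cons, List.foldl_nil]
      set st := pre.foldl pvSegStep ([], []) with hst
      by_cases htok : (tok == "\n") = true
      · have htok' : tok = "\n" := by simpa using htok
        simp only [pvSegStep, htok, if_true]
        constructor
        · rw [unl_snoc (st.1 ++ [st.2]) [] (by simp), ih.1, htok']
        · intro l hl
          rcases List.mem_append.1 hl with h | h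
          · exact ih.2 l h
          · simp at h; subst h; simp
      · simp only [pvSegStep, htok, if_false, Bool.false_eq_true]
        have htok' : tok ≠ "\n" := by simpa using htok
        constructor
        · rw [unl_snoc_snoc, ih.1]
        · intro l hl
          rcases List.mem_append.1 hl with h | h
          · exact ih.2 l (List.mem_append.2 (Or.inl h))
          · simp at h; subst h
            intro hc
            rcases List.mem_append.1 hc with h | h
            · exact ih.2 st.2 (by simp) h
            · simp at h; exact htok' h.symm

theorem pick_eq (ls : List (List String)) (h : ∀ l ∈ ls, "\n" ∉ l) :
    listGo (unl ls).reverse none = pickOpt ls.reverse := by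
  induction ls using List.reverseRecOn with
  | nil => simp [unl, listGo, pickOpt]
  | append_singleton ls seg ih =>
      have hseg : "\n" ∉ seg := h seg (by simp)
      have hsegr : "\n" ∉ seg.reverse := by simpa using hseg
      rw [List.reverse_append, List.reverse_singleton, List.singleton_append]
      cases hls : ls with
      | nil =>
          subst hls
          simp only [unl, List.nil_append]
          have hsplit := (listGo_split seg.reverse [] hsegr (Or.inl rfl)).1
          simp only [List.append_nil] at hsplit
          rw [hsplit, (stateGo_eq seg).1]
          rcases hlc : pvLastCodeChar seg with _ | c <;> simp [pickOpt, hlc]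
      | cons x xs =>
          rw [← hls]
          have hne : ls ≠ [] := by simp [hls]
          rw [unl_snoc ls seg hne]
          have hrev : (unl ls ++ "\n" :: seg).reverse
              = seg.reverse ++ ("\n" :: (unl ls).reverse) := by
            simp
          rw [hrev]
          have hsplit := (listGo_split seg.reverse ("\n" :: (unl ls).reverse) hsegr
            (Or.inr ⟨_, rfl⟩)).1
          rw [hsplit, (stateGo_eq seg).1]
          have ihh := ih (fun l hl => h l (List.mem_append.2 (Or.inl hl)))
          rcases hlc : pvLastCodeChar seg with _ | c <;> simp [pickOpt, hlc, ihh]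

theorem pvPick_eq (ls : List (List String)) : pvPick ls = (pickOpt ls == some ":") := by
  induction ls with
  | nil => simp [pvPick, pickOpt]
  | cons l rest ih =>
      simp only [pvPick, pickOpt]
      cases pvLastCodeChar l with
      | none => simpa using ih
      | some c => simp

-- ===== VERDICT (by name: the statement is the Claim_ definition above) =====
theorem should_auto_indent_py_spec : Claim_equal_should_auto_indent_py := by
  unfold Claim_equal_should_auto_indent_py
  intro buffer pos _ hpre
  unfold Spec_should_auto_indent_py
  unfold Pre_should_auto_indent_py at hpre
  simp only [should_auto_indent_py, should_auto_indent_py_alt]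
  by_cases hpos : pos > 0
  · rw [if_pos hpos, PySem.List.slice_to buffer (le_of_lt hpos)]
    have hn : pos.toNat ≤ buffer.length := by omega
    rw [saiGo_eq buffer pos.toNat none hn]
    have hseg := seg_inv (buffer.take pos.toNat)
    rw [pvPick_eq, ← pick_eq _ hseg.2, hseg.1]
  · rw [if_neg hpos]
    have h0 : pos.toNat = 0 := by omega
    rw [h0]
    simp only [List.foldl_nil, saiGo]
    decide

theorem should_auto_indent_py_raises : Claim_raises_should_auto_indent_py := by
  unfold Claim_raises_should_auto_indent_py
  constructor
  · intro buffer pos _ hr hp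
    unfold Raises_should_auto_indent_py at hr
    unfold Pre_should_auto_indent_py at hp
    omega
  · exact ⟨by decide, by decide, by decide⟩

-- self-check: the raise witness really lies in Raises_ (extracted from the theorem above)
theorem pvRaiseWitness_ok : Raises_should_auto_indent_py
    (pvRaiseWitness_should_auto_indent_py.1) (pvRaiseWitness_should_auto_indent_py.2) :=
  should_auto_indent_py_raises.2.2.1
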